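-- pv_equiv track=rewrite | github.com/alandrewjr/Mason_Sem_02 | kenken.py | contains_only_valid_symbols
-- ===== SOURCE A (Python) =====
-- def get_valid_numbers(size):
--     x = 0
--     mylist = []
--     while x < size:
--         x = x + 1
--         mylist.append(x)
--     return mylist
--
-- def contains_only_valid_symbols(puzzle, complete):
--     Passed = True
--     z = 0
--     if complete:
--         for x in puzzle:
--             if Passed:
--                 for y in x:
--                     if y == None:
--                         Passed = False
--                         break
--             else:
--                 break
--         if Passed:
--             VaildNums = get_valid_numbers(len(puzzle))
--             for w in puzzle:
--                 if Passed:
--                     for z in w: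
--                         if z in VaildNums:
--                             Passed = True
--                         else:
--                             Passed = False
--                             break
--                 else:
--                     break
--     else:
--         VaildNums = get_valid_numbers(len(puzzle))
--         for w in puzzle:
--             if Passed:
--                 for z in w:
--                     if z in VaildNums or z == None:
--                         Passed = True
--                     else:
--                         Passed = False
--                         break
--             else:
--                 break
--     return Passed
-- ===== SOURCE B (Python) =====
-- def contains_only_valid_symbols(puzzle, complete):
--     cells = [c for row in puzzle for c in row]
--     if complete and None in cells:
--         return False
--     nums = [c for c in cells if c != None]
--     if not nums:
--         return True
--     return min(nums) >= 1 and max(nums) <= len(puzzle)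
-- ===== Notes on version B (the rewrite author's own statement) =====
-- stated objective: alternative
-- what changed: Instead of testing every cell for membership in an explicitly built list of valid numbers, B flattens the grid once and decides validity by an extremum argument: since the valid symbols are the contiguous range 1..n, all filled cells are valid iff min(filled) >= 1 and max(filled) <= n; no valid-number collection is ever built.
import Mathlib
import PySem

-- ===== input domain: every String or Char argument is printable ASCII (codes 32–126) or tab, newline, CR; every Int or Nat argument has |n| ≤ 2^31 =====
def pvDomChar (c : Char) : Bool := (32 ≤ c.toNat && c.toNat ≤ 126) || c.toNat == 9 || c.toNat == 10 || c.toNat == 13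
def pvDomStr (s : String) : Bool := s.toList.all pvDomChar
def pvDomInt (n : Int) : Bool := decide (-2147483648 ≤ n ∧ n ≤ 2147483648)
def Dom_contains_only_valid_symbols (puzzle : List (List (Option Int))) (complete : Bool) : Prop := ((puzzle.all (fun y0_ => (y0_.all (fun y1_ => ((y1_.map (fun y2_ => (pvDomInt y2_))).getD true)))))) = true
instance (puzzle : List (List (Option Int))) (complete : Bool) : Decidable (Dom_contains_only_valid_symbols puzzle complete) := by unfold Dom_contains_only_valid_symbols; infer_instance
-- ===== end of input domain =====

-- B replaces A's per-cell membership scans over an explicitly built valid-number list by an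
-- extremum argument: the valid symbols are the contiguous range 1..n, so the filled cells are
-- all valid iff min(filled) >= 1 and max(filled) <= n (objective: alternative algorithm).

-- ===== PORT A =====
-- while x < size: x = x + 1; mylist.append(x)
def pvGvnLoop (size x : Int) (mylist : List Int) : List Int :=
  if x < size then pvGvnLoop size (x + 1) (mylist ++ [x + 1]) else mylist
termination_by (size - x).toNat
decreasing_by omega

def get_valid_numbers (size : Int) : List Int := pvGvnLoop size 0 []

-- inner 'for y in x' loop of the None check: break (set Passed False) on the first None
def pvAInnerNone : List (Option Int) → Bool
  | [] => true
  | y :: ys => if y = none then false else pvAInnerNone ys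

-- outer loop with 'if Passed: … else: break'
def pvAOuterNone : List (List (Option Int)) → Bool
  | [] => true
  | x :: xs => if pvAInnerNone x then pvAOuterNone xs else false

-- Python's `z in VaildNums` where the list holds ints: False when z is None (exact)
def pvAInnerMem (valid : List Int) : List (Option Int) → Bool
  | [] => true
  | z :: zs => if (match z with | some v => valid.contains v | none => false)
               then pvAInnerMem valid zs else false

def pvAOuterMem (valid : List Int) : List (List (Option Int)) → Bool
  | [] => true
  | w :: ws => if pvAInnerMem valid w then pvAOuterMem valid ws else false

-- incomplete branch inner loop: `z in VaildNums or z == None`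
def pvAInnerMemN (valid : List Int) : List (Option Int) → Bool
  | [] => true
  | z :: zs => if ((match z with | some v => valid.contains v | none => false) || (z == none))
               then pvAInnerMemN valid zs else false

def pvAOuterMemN (valid : List Int) : List (List (Option Int)) → Bool
  | [] => true
  | w :: ws => if pvAInnerMemN valid w then pvAOuterMemN valid ws else false

def contains_only_valid_symbols (puzzle : List (List (Option Int))) (complete : Bool) : Bool :=
  if complete then
    let passed := pvAOuterNone puzzle
    if passed then pvAOuterMem (get_valid_numbers (puzzle.length : Int)) puzzle
    else passed
  else
    pvAOuterMemN (get_valid_numbers (puzzle.length : Int)) puzzle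

-- ===== PORT B =====
def contains_only_valid_symbols_alt (puzzle : List (List (Option Int))) (complete : Bool) : Bool :=
  -- cells = [c for row in puzzle for c in row]
  let cells := puzzle.flatMap (fun row => row)
  -- if complete and None in cells: return False
  if complete && cells.contains none then false
  else
    -- nums = [c for c in cells if c != None]  (the filled cells, as ints)
    let nums := cells.filterMap (fun c => c)
    -- if not nums: return True
    if nums = [] then true
    else
      -- min(nums) >= 1 and max(nums) <= len(puzzle)
      match PySem.List.min? nums (fun x => x), PySem.List.max? nums (fun x => x) with
      | some m, some M => decide (1 ≤ m) && decide (M ≤ (puzzle.length : Int))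
      | _, _ => true

-- ===== PRECONDITION & SPEC =====
def Spec_contains_only_valid_symbols (puzzle : List (List (Option Int))) (complete : Bool) (out : Bool) : Prop := out = contains_only_valid_symbols_alt puzzle complete
instance (puzzle : List (List (Option Int))) (complete : Bool) (out : Bool) : Decidable (Spec_contains_only_valid_symbols puzzle complete out) := by unfold Spec_contains_only_valid_symbols; infer_instance

-- ===== CLAIM (what is proved, stated in full; the proofs are below) =====
def Claim_equal_contains_only_valid_symbols : Prop := ∀ (puzzle : List (List (Option Int))) (complete : Bool), Dom_contains_only_valid_symbols puzzle complete → Spec_contains_only_valid_symbols puzzle complete (contains_only_valid_symbols puzzle complete)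

-- ===== LEMMAS AND PROOFS =====

theorem mem_pvGvnLoop (size x : Int) (acc : List Int) (v : Int) :
    v ∈ pvGvnLoop size x acc ↔ v ∈ acc ∨ (x < v ∧ v ≤ size) := by
  by_cases h : x < size
  · rw [pvGvnLoop, if_pos h, mem_pvGvnLoop]
    simp only [List.mem_append, List.mem_singleton]
    constructor
    · rintro (⟨h1 | h1⟩ | ⟨h1, h2⟩)
      · exact Or.inl h1
      · exact Or.inr ⟨by omega, by omega⟩
      · exact Or.inr ⟨by omega, h2⟩
    · rintro (h1 | ⟨h1, h2⟩)
      · exact Or.inl (Or.inl h1)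
      · by_cases hv : v = x + 1
        · exact Or.inl (Or.inr hv)
        · exact Or.inr ⟨by omega, h2⟩
  · rw [pvGvnLoop, if_neg h]
    constructor
    · exact Or.inl
    · rintro (h1 | ⟨h1, h2⟩)
      · exact h1
      · omega
termination_by (size - x).toNat
decreasing_by omega

theorem mem_get_valid_numbers (size v : Int) :
    v ∈ get_valid_numbers size ↔ 0 < v ∧ v ≤ size := by
  simp [get_valid_numbers, mem_pvGvnLoop]

-- A's loops as List.all over the flattened cells
theorem pvAOuterNone_eq_all (p : List (List (Option Int))) :
    pvAOuterNone p = (p.flatMap (fun row => row)).all (fun c => !(c == none)) := by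
  induction p with
  | nil => rfl
  | cons w ws ih =>
    have hw : pvAInnerNone w = w.all (fun c => !(c == none)) := by
      induction w with
      | nil => rfl
      | cons z zs ihz => cases z <;> simp [pvAInnerNone, ihz]
    simp only [pvAOuterNone, List.flatMap_cons, List.all_append, hw, ih]
    split_ifs with h <;> simp_all

theorem pvAOuterMem_eq_all (valid : List Int) (p : List (List (Option Int))) :
    pvAOuterMem valid p
      = (p.flatMap (fun row => row)).all
          (fun c => match c with | some v => valid.contains v | none => false) := by
  induction p with
  | nil => rfl
  | cons w ws ih =>
    have hw : pvAInnerMem valid w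
        = w.all (fun c => match c with | some v => valid.contains v | none => false) := by
      induction w with
      | nil => rfl
      | cons z zs ihz =>
        simp only [pvAInnerMem, List.all_cons, ihz]
        split_ifs with h <;> simp_all
    simp only [pvAOuterMem, List.flatMap_cons, List.all_append, hw, ih]
    split_ifs with h <;> simp_all

theorem pvAOuterMemN_eq_all (valid : List Int) (p : List (List (Option Int))) :
    pvAOuterMemN valid p
      = (p.flatMap (fun row => row)).all
          (fun c => (match c with | some v => valid.contains v | none => false) || (c == none)) := by
  induction p with
  | nil => rfl
  | cons w ws ih =>
    have hw : pvAInnerMemN valid w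
        = w.all (fun c => (match c with | some v => valid.contains v | none => false) || (c == none)) := by
      induction w with
      | nil => rfl
      | cons z zs ihz =>
        simp only [pvAInnerMemN, List.all_cons, ihz]
        split_ifs with h <;> simp_all
    simp only [pvAOuterMemN, List.flatMap_cons, List.all_append, hw, ih]
    split_ifs with h <;> simp_all

-- the min/max test of B decides "every filled cell lies in 1..n"
theorem minmax_eq_all_range (nums : List Int) (n : Int) :
    (if nums = [] then true
     else match PySem.List.min? nums (fun x => x), PySem.List.max? nums (fun x => x) with
       | some m, some M => decide (1 ≤ m) && decide (M ≤ n)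
       | _, _ => true)
      = nums.all (fun v => decide (1 ≤ v ∧ v ≤ n)) := by
  by_cases h : nums = []
  · simp [h]
  · rw [if_neg h]
    have hmne : PySem.List.min? nums (fun x : Int => x) ≠ none := by
      intro hc; exact h ((PySem.List.min?_eq_none_iff nums (fun x : Int => x)).mp hc)
    have hMne : PySem.List.max? nums (fun x : Int => x) ≠ none := by
      intro hc; exact h ((PySem.List.max?_eq_none_iff nums (fun x : Int => x)).mp hc)
    obtain ⟨m, hm⟩ := Option.ne_none_iff_exists'.mp hmne
    obtain ⟨M, hM⟩ := Option.ne_none_iff_exists'.mp hMne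
    rw [hm, hM]
    have hmmem := PySem.List.min?_mem hm
    have hMmem := PySem.List.max?_mem hM
    have hmin := PySem.List.min?_isMin hm
    have hmax := PySem.List.max?_isMax hM
    rw [Bool.eq_iff_iff]
    simp only [Bool.and_eq_true, decide_eq_true_eq, List.all_eq_true]
    constructor
    · rintro ⟨h1, h2⟩ v hv
      exact ⟨le_trans h1 (hmin v hv), le_trans (hmax v hv) h2⟩
    · intro hall
      exact ⟨(hall m hmmem).1, (hall M hMmem).2⟩

-- the cell-wise predicates, pushed through filterMap
theorem all_filterMap_some (cells : List (Option Int)) (q : Int → Bool) :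
    (cells.filterMap (fun c => c)).all q
      = cells.all (fun c => match c with | some v => q v | none => true) := by
  induction cells with
  | nil => rfl
  | cons c cs ih => cases c <;> simp [ih]

theorem contains_only_valid_symbols_eq (puzzle : List (List (Option Int))) (complete : Bool) :
    contains_only_valid_symbols puzzle complete = contains_only_valid_symbols_alt puzzle complete := by
  unfold contains_only_valid_symbols contains_only_valid_symbols_alt
  set n : Int := (puzzle.length : Int) with hn
  set cells := puzzle.flatMap (fun row => row) with hcells
  have hcell : ∀ v : Int, (get_valid_numbers n).contains v = decide (1 ≤ v ∧ v ≤ n) := by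
    intro v
    rw [List.contains_eq_mem, Bool.eq_iff_iff]
    simp only [decide_eq_true_eq, mem_get_valid_numbers]
    omega
  have hrange := minmax_eq_all_range (cells.filterMap (fun c => c)) n
  rw [all_filterMap_some] at hrange
  cases complete with
  | false =>
    simp only [Bool.false_eq_true, if_false, Bool.false_and]
    rw [pvAOuterMemN_eq_all, ← hcells, hrange]
    congr 1
    funext c
    cases c with
    | none => simp
    | some v =>
      have h0 : ((some v : Option Int) == none) = false := rfl
      rw [h0, Bool.or_false]
      exact hcell v
  | true =>
    simp only [if_true, Bool.true_and]
    rw [pvAOuterNone_eq_all, ← hcells]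
    by_cases hnone : cells.contains none
    · rw [if_pos hnone]
      have : cells.all (fun c => !(c == none)) = false := by
        rw [List.contains_eq_mem] at hnone
        simp only [decide_eq_true_eq] at hnone
        simp only [List.all_eq_false]
        exact ⟨none, hnone, by simp⟩
      rw [this]
      simp
    · rw [if_neg hnone]
      rw [List.contains_eq_mem] at hnone
      simp only [decide_eq_true_eq] at hnone
      have hallsome : cells.all (fun c => !(c == none)) = true := by
        simp only [List.all_eq_true]
        intro c hc
        cases c with
        | none => exact absurd hc hnone
        | some v => simp
      rw [hallsome, if_pos rfl]
      rw [pvAOuterMem_eq_all, ← hcells, hrange, Bool.eq_iff_iff]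
      simp only [List.all_eq_true]
      constructor
      · intro h c hc
        cases c with
        | none => simp
        | some v =>
          have hv : (get_valid_numbers n).contains v = true := h (some v) hc
          show decide (1 ≤ v ∧ v ≤ n) = true
          rw [← hcell v]; exact hv
      · intro h c hc
        cases c with
        | none => exact absurd hc hnone
        | some v =>
          have hv : decide (1 ≤ v ∧ v ≤ n) = true := h (some v) hc
          show (get_valid_numbers n).contains v = true
          rw [hcell v]; exact hv

-- ===== VERDICT (by name: the statement is the Claim_ definition above) =====
theorem contains_only_valid_symbols_spec : Claim_equal_contains_only_valid_symbols := by
  intro puzzle complete _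
  exact contains_only_valid_symbols_eq puzzle complete
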